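-- pv_equiv track=rewrite | github.com/epilectrik/voynich | context/generate_expert_context.py | _strip_claude_index_sections
-- ===== SOURCE A (Python) =====
-- def _strip_claude_index_sections(content):
--     """Strip sections from CLAUDE_INDEX that are useless to the expert agent.
--
--     Removes:
--     - DATA LOADING WARNING (for script-writing agents)
--     - Navigation table (for file-reading agents)
--     - File Registry (file paths)
--     - Automation (tool locations)
--     - Context System (progressive disclosure instructions)
--     """
--     sections_to_strip = [
--         'DATA LOADING WARNING',
--         'Navigation',
--         'File Registry',
--         'Automation',
--         'Context System',
--     ]
--     lines = content.split('\n')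
--     filtered = []
--     skip_until_next_h2 = False
--
--     for line in lines:
--         # Check if this is an ## header
--         if line.startswith('## '):
--             header_text = line[3:].strip()
--             if any(header_text.startswith(s) for s in sections_to_strip):
--                 skip_until_next_h2 = True
--                 continue
--             else:
--                 skip_until_next_h2 = False
--
--         if skip_until_next_h2:
--             continue
--
--         filtered.append(line)
--
--     return '\n'.join(filtered)
-- ===== SOURCE B (Python) =====
-- def _strip_claude_index_sections(content):
--     """Strip sections from CLAUDE_INDEX that are useless to the expert agent.
--
--     Group-then-filter: split into lines, group the lines into a preamble plus
--     '## '-headed sections, drop any section whose header text starts with a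
--     blacklisted prefix, and flatten the survivors.
--     """
--     prefixes = (
--         'DATA LOADING WARNING',
--         'Navigation',
--         'File Registry',
--         'Automation',
--         'Context System',
--     )
--     lines = content.split('\n')
--     sections = []
--     cur = []  # current group; the first group is the preamble
--     for line in lines:
--         if line.startswith('## '):
--             sections.append(cur)
--             cur = [line]
--         else:
--             cur.append(line)
--     sections.append(cur)
--
--     def keep(sec):
--         if not sec or not sec[0].startswith('## '):
--             return True  # preamble (or empty) is always kept
--         text = sec[0][3:].strip()
--         return not any(text.startswith(p) for p in prefixes)
--
--     out = []
--     for sec in sections: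
--         if keep(sec):
--             out.extend(sec)
--     return '\n'.join(out)
-- ===== Notes on version B (the rewrite author's own statement) =====
-- stated objective: alternative
-- what changed: Replaces A's single scan with a skip_until_next_h2 flag by a two-phase group-then-filter pass: lines are grouped into a preamble plus header-led sections, whole sections with blacklisted headers are dropped, and the survivors are flattened.
import Mathlib
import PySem

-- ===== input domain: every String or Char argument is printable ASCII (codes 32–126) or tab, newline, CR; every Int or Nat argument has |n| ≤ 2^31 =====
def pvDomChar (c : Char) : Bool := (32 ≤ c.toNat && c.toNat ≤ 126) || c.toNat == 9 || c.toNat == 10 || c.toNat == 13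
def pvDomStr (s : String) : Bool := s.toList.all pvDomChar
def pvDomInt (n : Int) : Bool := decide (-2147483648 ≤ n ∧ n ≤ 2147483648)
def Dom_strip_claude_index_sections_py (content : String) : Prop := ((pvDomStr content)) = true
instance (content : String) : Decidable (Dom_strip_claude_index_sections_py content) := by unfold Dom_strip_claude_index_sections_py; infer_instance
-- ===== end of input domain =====

-- B replaces A's skip-flag state machine by a group-then-filter pass (objective: alternative decomposition, same cost).

-- ===== PORT A =====
-- sections_to_strip (shared by both ports, as in both Pythons)
def pvStripList : List String :=
  ["DATA LOADING WARNING", "Navigation", "File Registry", "Automation", "Context System"]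

-- line.startswith('## ')
def pvIsHeader (line : String) : Bool := PySem.Str.startswith line "## "

-- any(line[3:].strip().startswith(s) for s in sections_to_strip)
def pvMatches (line : String) : Bool :=
  pvStripList.any (fun s => PySem.Str.startswith (PySem.Str.strip (PySem.Str.slice line (some 3) none)) s)

-- A's for-loop over lines with the skip_until_next_h2 flag, as structural recursion
def pvALoop : List String → Bool → List String
  | [], _ => []
  | l :: ls, skip =>
    if pvIsHeader l then
      if pvMatches l then pvALoop ls true
      else l :: pvALoop ls false
    else if skip then pvALoop ls skip
    else l :: pvALoop ls skip

def strip_claude_index_sections_py (content : String) : String :=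
  -- content.split('\n'): sep "\n" ≠ "" so split? is always some; getD is never hit
  let lines := (PySem.Str.split? content "\n").getD []
  PySem.Str.join "\n" (pvALoop lines false)

-- ===== PORT B =====
-- B's grouping loop: state cur = current group; emits groups in order (sections.append)
def pvBGroup : List String → List String → List (List String)
  | [], cur => [cur]
  | l :: ls, cur =>
    if pvIsHeader l then cur :: pvBGroup ls [l]
    else pvBGroup ls (cur ++ [l])

-- B's keep(sec)
def pvKeep : List String → Bool
  | [] => true
  | h :: _ => if pvIsHeader h then !pvMatches h else true

def strip_claude_index_sections_py_alt (content : String) : String :=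
  let lines := (PySem.Str.split? content "\n").getD []
  let sections := pvBGroup lines []
  PySem.Str.join "\n" ((sections.filter pvKeep).flatten)

-- ===== PRECONDITION & SPEC =====
def Spec_strip_claude_index_sections_py (content : String) (out : String) : Prop := out = strip_claude_index_sections_py_alt content
instance (content : String) (out : String) : Decidable (Spec_strip_claude_index_sections_py content out) := by unfold Spec_strip_claude_index_sections_py; infer_instance

-- ===== CLAIM (what is proved, stated in full; the proofs are below) =====
def Claim_equal_strip_claude_index_sections_py : Prop := ∀ (content : String), Dom_strip_claude_index_sections_py content → Spec_strip_claude_index_sections_py content (strip_claude_index_sections_py content)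

-- ===== LEMMAS AND PROOFS =====

-- appending a non-header line to a group does not change whether it is kept
lemma pvKeep_append (cur : List String) (l : String) (hl : pvIsHeader l = false) :
    pvKeep (cur ++ [l]) = pvKeep cur := by
  cases cur with
  | nil => simp [pvKeep, hl]
  | cons h t => simp [pvKeep]

-- the surviving lines of B's grouping of ls, started with group cur, are cur (if kept)
-- followed by A's scan of ls with skip = ¬(cur kept)
lemma pvMain (ls : List String) : ∀ cur : List String,
    ((pvBGroup ls cur).filter pvKeep).flatten
      = (if pvKeep cur then cur else []) ++ pvALoop ls (!pvKeep cur) := by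
  induction ls with
  | nil => intro cur; by_cases h : pvKeep cur <;> simp [pvBGroup, pvALoop, h]
  | cons l ls ih =>
    intro cur
    by_cases hh : pvIsHeader l = true
    · by_cases hm : pvMatches l = true
      · have hk : pvKeep [l] = false := by simp [pvKeep, hh, hm]
        by_cases h : pvKeep cur <;>
          simp [pvBGroup, pvALoop, hh, hm, hk, ih, h]
      · have hk : pvKeep [l] = true := by
          simp [pvKeep, hh]; simp at hm; exact hm
        by_cases h : pvKeep cur <;>
          simp [pvBGroup, pvALoop, hh, hm, hk, ih, h]
    · simp at hh
      have hk := pvKeep_append cur l hh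
      by_cases h : pvKeep cur <;>
        simp [pvBGroup, pvALoop, hh, ih, hk, h]

-- ===== VERDICT (by name: the statement is the Claim_ definition above) =====
theorem strip_claude_index_sections_py_spec : Claim_equal_strip_claude_index_sections_py := by
  intro content _
  unfold Spec_strip_claude_index_sections_py strip_claude_index_sections_py strip_claude_index_sections_py_alt
  have h := pvMain ((PySem.Str.split? content "\n").getD []) []
  simp [pvKeep] at h
  simp only [h]
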